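-- pv_equiv track=rewrite | github.com/ceedee666/aoc_2019 | day_01/day_01.py | calculate_total_fuel
-- ===== SOURCE A (Python) =====
-- def calculate_fuel(mass):
--     return (mass // 3) - 2
--
-- def calculate_total_fuel(modules):
--     all_masses = []
--     for mass in modules:
--         mass = calculate_fuel(mass)
--         while mass > 0:
--             all_masses.append(mass)
--             mass = calculate_fuel(mass)
--     return sum(all_masses)
-- ===== SOURCE B (Python) =====
-- def calculate_total_fuel(modules):
--     def fuel_req(m):
--         f = m // 3 - 2
--         return 0 if f <= 0 else f + fuel_req(f)
--     return sum(fuel_req(m) for m in modules)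
-- ===== Notes on version B (the rewrite author's own statement) =====
-- stated objective: simpler
-- what changed: Replaces the imperative while-loop that appends every intermediate fuel value to a shared list (summed at the end) with a direct recursion fuel_req on the rocket-equation recurrence, summed per module with no intermediate list.
import Mathlib
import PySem

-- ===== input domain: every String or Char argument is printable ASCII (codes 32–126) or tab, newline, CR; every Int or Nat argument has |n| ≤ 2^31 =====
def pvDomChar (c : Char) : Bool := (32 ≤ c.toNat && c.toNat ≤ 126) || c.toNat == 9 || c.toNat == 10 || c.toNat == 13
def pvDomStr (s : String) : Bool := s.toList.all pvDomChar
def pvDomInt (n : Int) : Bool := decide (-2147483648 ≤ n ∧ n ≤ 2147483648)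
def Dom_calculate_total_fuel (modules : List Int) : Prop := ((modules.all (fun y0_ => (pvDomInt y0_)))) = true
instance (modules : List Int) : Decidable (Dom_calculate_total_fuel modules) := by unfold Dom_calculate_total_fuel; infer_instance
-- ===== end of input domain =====

-- B replaces A's imperative while-loop-with-accumulator-list by a direct recursion on the fuel recurrence (simpler decomposition, same cost).


-- ===== PORT A =====
def calculate_fuel (mass : Int) : Int := PySem.Int.floordiv mass 3 - 2

theorem pv_fuel_lt (m : Int) (h : 0 < m) : (calculate_fuel m).toNat < m.toNat := by
  unfold calculate_fuel
  rw [PySem.Int.floordiv_eq_ediv_of_pos (by omega : (0:Int) < 3)]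
  omega

-- the inner 'while mass > 0' loop, carrying the shared all_masses list
def pv_whileA (mass : Int) (all_masses : List Int) : List Int :=
  if mass > 0 then pv_whileA (calculate_fuel mass) (all_masses ++ [mass]) else all_masses
termination_by mass.toNat
decreasing_by exact pv_fuel_lt mass (by omega)

def calculate_total_fuel (modules : List Int) : Int :=
  (modules.foldl (fun all_masses mass => pv_whileA (calculate_fuel mass) all_masses) []).sum

-- ===== PORT B =====
def fuel_req (m : Int) : Int :=
  let f := PySem.Int.floordiv m 3 - 2
  if f ≤ 0 then 0 else f + fuel_req f
termination_by m.toNat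
decreasing_by
  rename_i hf
  simp only [f] at hf
  rw [PySem.Int.floordiv_eq_ediv_of_pos (by omega : (0:Int) < 3)] at hf ⊢
  omega

def calculate_total_fuel_alt (modules : List Int) : Int :=
  modules.foldl (fun s m => s + fuel_req m) 0

-- ===== PRECONDITION & SPEC =====
def Spec_calculate_total_fuel (modules : List Int) (out : Int) : Prop := out = calculate_total_fuel_alt modules
instance (modules : List Int) (out : Int) : Decidable (Spec_calculate_total_fuel modules out) := by unfold Spec_calculate_total_fuel; infer_instance

-- ===== CLAIM (what is proved, stated in full; the proofs are below) =====
def Claim_equal_calculate_total_fuel : Prop := ∀ (modules : List Int), Dom_calculate_total_fuel modules → Spec_calculate_total_fuel modules (calculate_total_fuel modules)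

-- ===== LEMMAS AND PROOFS =====

-- proof-only helper: the sum of the decreasing fuel chain starting at mass
def pv_chain (m : Int) : Int :=
  if m > 0 then m + pv_chain (calculate_fuel m) else 0
termination_by m.toNat
decreasing_by exact pv_fuel_lt m (by omega)

-- A's inner loop summed equals the chain sum starting at the same mass
theorem sum_whileA (mass : Int) (acc : List Int) :
    (pv_whileA mass acc).sum = acc.sum + pv_chain mass := by
  induction mass, acc using pv_whileA.induct with
  | case1 m acc hm ih =>
    rw [pv_whileA, if_pos hm, ih,
      show pv_chain m = m + pv_chain (calculate_fuel m) from by rw [pv_chain, if_pos hm]]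
    simp [List.sum_append]; ring
  | case2 m acc hm =>
    rw [pv_whileA, if_neg hm, show pv_chain m = 0 from by rw [pv_chain, if_neg hm]]
    ring

-- B's recursion computes the chain sum starting after one fuel step
theorem fuel_req_eq_chain (m : Int) : fuel_req m = pv_chain (calculate_fuel m) := by
  induction m using fuel_req.induct with
  | case1 m f hf =>
    rw [fuel_req, pv_chain]
    simp only [calculate_fuel]
    rw [if_pos hf, if_neg (by omega)]
  | case2 m f hf ih =>
    rw [fuel_req, pv_chain]
    simp only [calculate_fuel] at *
    rw [if_neg hf, if_pos (by omega), ← ih]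

theorem foldB_shift (ms : List Int) (s : Int) :
    ms.foldl (fun s m => s + fuel_req m) s = s + ms.foldl (fun s m => s + fuel_req m) 0 := by
  induction ms generalizing s with
  | nil => simp
  | cons x xs ihx =>
    simp only [List.foldl_cons]
    rw [ihx, ihx (0 + fuel_req x)]; ring

theorem foldA_sum (modules : List Int) (acc : List Int) :
    (modules.foldl (fun all_masses mass => pv_whileA (calculate_fuel mass) all_masses) acc).sum
      = acc.sum + modules.foldl (fun s m => s + fuel_req m) 0 := by
  induction modules generalizing acc with
  | nil => simp
  | cons m ms ih =>
    simp only [List.foldl_cons]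
    rw [ih, sum_whileA, fuel_req_eq_chain, foldB_shift, foldB_shift ms (0 + pv_chain (calculate_fuel m))]
    ring

-- ===== VERDICT (by name: the statement is the Claim_ definition above) =====
theorem calculate_total_fuel_spec : Claim_equal_calculate_total_fuel := by
  intro modules _
  unfold Spec_calculate_total_fuel calculate_total_fuel calculate_total_fuel_alt
  rw [foldA_sum]
  simp
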